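-- pv_equiv track=rewrite | github.com/amahdi83/Tetris | tetris_env.py | get_row_transitions
-- ===== SOURCE A (Python) =====
-- def get_row_transitions(board):
--     """Returns the number of horizontal cell transitions."""
--     total = 0
--     for row in board:
--         row_count = 0
--         last_empty = True
--         for cell in row:
--             empty = cell == 0
--             if last_empty != empty:
--                 row_count += 1
--                 last_empty = empty
--         total += row_count
--     return total
-- ===== SOURCE B (Python) =====
-- def get_row_transitions(board):
--     """Returns the number of horizontal cell transitions."""
--     total = 0
--     for row in board:
--         # each maximal run of non-empty cells contributes exactly 2 transitions
--         # (one at its left edge, one at its right edge), except that a run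
--         # reaching the end of the row contributes only its left edge.
--         starts = sum(1 for i in range(len(row))
--                      if row[i] != 0 and (i == 0 or row[i - 1] == 0))
--         total += 2 * starts - (1 if row and row[-1] != 0 else 0)
--     return total
-- ===== Notes on version B (the rewrite author's own statement) =====
-- stated objective: alternative
-- what changed: Replaces A's per-cell last_empty state machine with run counting: B counts the maximal non-empty runs of each row (their start positions) and derives the transition count arithmetically as 2*runs minus 1 if the row ends non-empty, instead of tallying each boundary flip.
import Mathlib
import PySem

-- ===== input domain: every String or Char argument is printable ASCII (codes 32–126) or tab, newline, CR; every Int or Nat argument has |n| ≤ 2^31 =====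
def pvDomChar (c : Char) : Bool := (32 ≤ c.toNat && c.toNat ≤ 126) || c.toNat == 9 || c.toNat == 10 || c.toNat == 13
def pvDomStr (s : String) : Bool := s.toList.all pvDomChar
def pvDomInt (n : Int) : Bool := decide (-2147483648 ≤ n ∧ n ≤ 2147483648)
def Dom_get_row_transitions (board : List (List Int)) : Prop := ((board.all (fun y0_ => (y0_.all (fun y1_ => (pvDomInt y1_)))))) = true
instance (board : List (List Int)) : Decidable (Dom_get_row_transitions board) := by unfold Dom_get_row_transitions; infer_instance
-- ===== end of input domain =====

-- B replaces A's per-cell last_empty state machine by counting maximal non-empty runs and computing transitions as 2*runs minus 1 if the row ends non-empty (alternative decomposition, same cost).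


-- ===== PORT A =====
def get_row_transitions (board : List (List Int)) : Int :=
  board.foldl (fun total row =>
    total + (row.foldl (fun (s : Int × Bool) cell =>
      let empty := cell == 0
      if s.2 != empty then (s.1 + 1, empty) else s) ((0 : Int), true)).1) 0

-- ===== PORT B =====
-- row[i] / row[i-1] are always in range here (i ∈ range(len(row)), and i-1 only read when i ≠ 0),
-- so they are ported as getD; row[-1] (read only when row ≠ []) is ported as getLast?.
def get_row_transitions_alt (board : List (List Int)) : Int :=
  board.foldl (fun total row =>
    let starts : Int := ((List.range row.length).filter (fun i =>
        row.getD i 0 != 0 && (i == 0 || row.getD (i - 1) 0 == 0))).length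
    total + 2 * starts - (if row ≠ [] ∧ row.getLast?.getD 0 ≠ 0 then 1 else 0)) 0

-- ===== PRECONDITION & SPEC =====
def Spec_get_row_transitions (board : List (List Int)) (out : Int) : Prop := out = get_row_transitions_alt board
instance (board : List (List Int)) (out : Int) : Decidable (Spec_get_row_transitions board out) := by unfold Spec_get_row_transitions; infer_instance

-- ===== CLAIM (what is proved, stated in full; the proofs are below) =====
def Claim_equal_get_row_transitions : Prop := ∀ (board : List (List Int)), Dom_get_row_transitions board → Spec_get_row_transitions board (get_row_transitions board)

-- ===== LEMMAS AND PROOFS =====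

-- number of transitions of A's state machine starting from emptiness state `last`
def chg (last : Bool) : List Int → Int
  | [] => 0
  | c :: cs => (if last != (c == 0) then 1 else 0) + chg (c == 0) cs

-- number of run starts of a row, given the value of the cell just before it (sentinel 0 = empty)
def countStarts : List Int → Int → Int
  | [], _ => 0
  | c :: cs, prev => (if c ≠ 0 ∧ prev = 0 then 1 else 0) + countStarts cs c

lemma foldlA_eq_chg (cells : List Int) : ∀ (cnt : Int) (last : Bool),
    (cells.foldl (fun (s : Int × Bool) cell =>
      let empty := cell == 0
      if s.2 != empty then (s.1 + 1, empty) else s) (cnt, last)).1 = cnt + chg last cells := by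
  induction cells with
  | nil => intro cnt last; simp [chg]
  | cons c cs ih =>
    intro cnt last
    rw [List.foldl_cons]
    by_cases h : last = (c == 0)
    · have hb : (last != (c == 0)) = false := by simp [h]
      simp only [hb]
      rw [ih]
      simp [chg, hb]
      rw [h]
    · have hb : (last != (c == 0)) = true := by simp [bne, h]
      simp only [hb]
      rw [ih]
      simp [chg, hb]
      ring

-- B's filtered-index count equals the recursive run-start count with sentinel `prev`
lemma starts_eq (cs : List Int) : ∀ (prev : Int),
    (((List.range cs.length).filter (fun j =>
        cs.getD j 0 != 0 && ((prev :: cs).getD j 0 == 0))).length : Int) = countStarts cs prev := by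
  induction cs with
  | nil => intro prev; simp [countStarts]
  | cons c rest ih =>
    intro prev
    rw [List.length_cons, List.range_succ_eq_map]
    rw [List.filter_cons]
    have hmap : ((List.range rest.length).map Nat.succ).filter (fun j =>
        (c :: rest).getD j 0 != 0 && ((prev :: c :: rest).getD j 0 == 0))
        = ((List.range rest.length).filter (fun j =>
            rest.getD j 0 != 0 && ((c :: rest).getD j 0 == 0))).map Nat.succ := by
      rw [List.filter_map]
      congr 1
    by_cases h : c ≠ 0 ∧ prev = 0
    · have hp : ((c :: rest).getD 0 0 != 0 && ((prev :: c :: rest).getD 0 0 == 0)) = true := by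
        simp [h.1, h.2]
      simp only [hp, if_true]
      rw [List.length_cons, hmap, List.length_map]
      rw [countStarts, if_pos h]
      rw [← ih c]
      push_cast
      ring
    · have hp : ((c :: rest).getD 0 0 != 0 && ((prev :: c :: rest).getD 0 0 == 0)) = false := by
        by_cases hc : c = 0
        · simp [hc]
        · have hprev : ¬ prev = 0 := fun hpv => h ⟨hc, hpv⟩
          simp [hc, hprev]
      simp only [hp]
      rw [if_neg (by simp)]
      rw [hmap, List.length_map]
      rw [countStarts, if_neg h]
      rw [← ih c]
      ring

-- transitions = 2·runStarts + (1 if the sentinel is non-empty) − (1 if the last state is non-empty)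
lemma chg_formula (row : List Int) : ∀ (prev : Int),
    chg (prev == 0) row = 2 * countStarts row prev
      + (if prev ≠ 0 then 1 else 0) - (if row.getLast?.getD prev ≠ 0 then 1 else 0) := by
  induction row with
  | nil => intro prev; simp [chg, countStarts]; split_ifs <;> ring
  | cons c cs ih =>
    intro prev
    have hlast : (c :: cs).getLast?.getD prev = cs.getLast?.getD c := by
      rw [← List.getLastD_eq_getLast?, ← List.getLastD_eq_getLast?, List.getLastD_cons]
    rw [chg, ih c, countStarts, hlast]
    by_cases hc : c = 0 <;> by_cases hp : prev = 0 <;>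
      simp [hc, hp] <;> ring

lemma rowB_eq (total : Int) (row : List Int) :
    (let starts : Int := ((List.range row.length).filter (fun i =>
        row.getD i 0 != 0 && (i == 0 || row.getD (i - 1) 0 == 0))).length
     total + 2 * starts - (if row ≠ [] ∧ row.getLast?.getD 0 ≠ 0 then 1 else 0)) =
    total + (row.foldl (fun (s : Int × Bool) cell =>
      let empty := cell == 0
      if s.2 != empty then (s.1 + 1, empty) else s) ((0 : Int), true)).1 := by
  rw [foldlA_eq_chg]
  have hpred : (fun i => row.getD i 0 != 0 && (i == 0 || row.getD (i - 1) 0 == 0))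
      = (fun j => row.getD j 0 != 0 && (((0 : Int) :: row).getD j 0 == 0)) := by
    funext i
    cases i with
    | zero => simp
    | succ j => simp
  rw [hpred, starts_eq row 0]
  have h0 : ((0 : Int) == 0) = true := by decide
  have := chg_formula row 0
  rw [h0] at this
  rw [this]
  have htrail : (if row ≠ [] ∧ row.getLast?.getD 0 ≠ 0 then (1 : Int) else 0)
      = (if row.getLast?.getD 0 ≠ 0 then 1 else 0) := by
    cases row with
    | nil => simp
    | cons c cs => simp
  rw [htrail]
  simp
  ring

lemma main_eq (board : List (List Int)) : ∀ (total : Int),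
    board.foldl (fun total row =>
      total + (row.foldl (fun (s : Int × Bool) cell =>
        let empty := cell == 0
        if s.2 != empty then (s.1 + 1, empty) else s) ((0 : Int), true)).1) total =
    board.foldl (fun total row =>
      let starts : Int := ((List.range row.length).filter (fun i =>
          row.getD i 0 != 0 && (i == 0 || row.getD (i - 1) 0 == 0))).length
      total + 2 * starts - (if row ≠ [] ∧ row.getLast?.getD 0 ≠ 0 then 1 else 0)) total := by
  induction board with
  | nil => intro total; rfl
  | cons row rows ih =>
    intro total
    simp only [List.foldl]
    rw [← ih]
    congr 1
    exact (rowB_eq total row).symm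

-- ===== VERDICT (by name: the statement is the Claim_ definition above) =====
theorem get_row_transitions_spec : Claim_equal_get_row_transitions := by
  intro board _
  unfold Spec_get_row_transitions get_row_transitions get_row_transitions_alt
  exact main_eq board 0
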